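-- pv_equiv track=rewrite | github.com/Enjef/Algo | 700 - 799/717 - 1-bit and 2-bit Characters/717 - 1-bit and 2-bit Characters.py | isOneBitCharacter_best_speed
-- ===== SOURCE A (Python) =====
-- from typing import List
--
-- def isOneBitCharacter_best_speed(bits: List[int]) -> bool:
--     i = 0
--     while i < len(bits) - 1:
--         if bits[i] == 1:
--             i += 2
--         else:
--             i += 1
--     return i <= len(bits)-1
-- ===== SOURCE B (Python) =====
-- from typing import List
--
-- def isOneBitCharacter_best_speed(bits: List[int]) -> bool:
--     # Scan backward: the last char is one-bit iff the run of 1s just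
--     # before it has even length.  Empty input has no last char.
--     if not bits:
--         return False
--     ones = 0
--     for b in reversed(bits[:-1]):
--         if b != 1:
--             break
--         ones += 1
--     return ones % 2 == 0
-- ===== Notes on version B (the rewrite author's own statement) =====
-- stated objective: faster
-- what changed: Replaces A's forward while-loop block parse (step 2 on a 1, else 1) with a backward scan that counts the run of 1s immediately before the last element and returns whether that count is even.
import Mathlib
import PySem

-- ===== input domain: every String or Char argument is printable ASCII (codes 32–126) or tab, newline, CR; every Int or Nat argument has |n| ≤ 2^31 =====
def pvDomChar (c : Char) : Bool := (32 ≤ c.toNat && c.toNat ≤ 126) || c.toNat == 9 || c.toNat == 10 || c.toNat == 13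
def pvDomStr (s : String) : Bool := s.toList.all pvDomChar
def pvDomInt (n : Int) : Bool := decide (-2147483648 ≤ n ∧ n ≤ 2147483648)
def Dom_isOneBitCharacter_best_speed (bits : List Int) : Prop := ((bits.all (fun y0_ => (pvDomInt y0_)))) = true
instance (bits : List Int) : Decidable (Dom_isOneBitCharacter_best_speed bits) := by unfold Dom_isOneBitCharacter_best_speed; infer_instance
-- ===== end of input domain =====

-- B replaces the forward block parse by a backward scan of the run of 1s before the last element (its parity decides); same O(n) cost, plainer.
-- ===== PORT A =====
-- while-loop of A: i advances by 2 on a 1, by 1 otherwise, until i >= len(bits)-1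
def pvALoop (bits : List Int) (i : Nat) : Nat :=
  if _h : i < bits.length - 1 then
    if bits.getD i 0 = 1 then pvALoop bits (i + 2) else pvALoop bits (i + 1)
  else i
termination_by bits.length - i
decreasing_by all_goals omega

def isOneBitCharacter_best_speed (bits : List Int) : Bool :=
  decide ((pvALoop bits 0 : Int) ≤ (bits.length : Int) - 1)

-- ===== PORT B =====
-- the for/break loop of B: counts leading 1s of its argument (B feeds it reversed(bits[:-1]))
def pvCountOnes : List Int → Nat
  | [] => 0
  | b :: rest => if b ≠ 1 then 0 else pvCountOnes rest + 1

-- bits[:-1] is ported as List.dropLast (exact: both give all elements but the last, [] on [])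
def isOneBitCharacter_best_speed_alt (bits : List Int) : Bool :=
  if bits = [] then false
  else decide (pvCountOnes bits.dropLast.reverse % 2 = 0)

-- ===== PRECONDITION & SPEC =====
def Spec_isOneBitCharacter_best_speed (bits : List Int) (out : Bool) : Prop := out = isOneBitCharacter_best_speed_alt bits
instance (bits : List Int) (out : Bool) : Decidable (Spec_isOneBitCharacter_best_speed bits out) := by unfold Spec_isOneBitCharacter_best_speed; infer_instance

-- ===== CLAIM (what is proved, stated in full; the proofs are below) =====
def Claim_equal_isOneBitCharacter_best_speed : Prop := ∀ (bits : List Int), Dom_isOneBitCharacter_best_speed bits → Spec_isOneBitCharacter_best_speed bits (isOneBitCharacter_best_speed bits)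

-- ===== LEMMAS AND PROOFS =====

-- shifting A's loop across the head of the list
theorem pvALoop_cons (bs : List Int) (b : Int) : ∀ (k i : Nat), bs.length - i ≤ k →
    pvALoop (b :: bs) (i + 1) = pvALoop bs i + 1 := by
  intro k
  induction k with
  | zero =>
      intro i hi
      conv_lhs => rw [pvALoop]
      conv_rhs => rw [pvALoop]
      simp only [List.length_cons]
      rw [dif_neg (by omega), dif_neg (by omega)]
  | succ k ih =>
      intro i hi
      conv_lhs => rw [pvALoop]
      conv_rhs => rw [pvALoop]
      simp only [List.length_cons, List.getD_cons_succ]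
      by_cases hg : i < bs.length - 1
      · rw [dif_pos (by omega), dif_pos hg]
        by_cases hb : bs.getD i 0 = 1
        · rw [if_pos hb, if_pos hb]
          exact ih (i + 2) (by omega)
        · rw [if_neg hb, if_neg hb]
          exact ih (i + 1) (by omega)
      · rw [dif_neg (by omega), dif_neg hg]

theorem pvALoop_shift (bs : List Int) (b : Int) (i : Nat) :
    pvALoop (b :: bs) (i + 1) = pvALoop bs i + 1 :=
  pvALoop_cons bs b (bs.length - i) i le_rfl

-- dropping k consumed cells in front of A's final comparison does not change it
theorem pv_decide_shift (a L k : Nat) :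
    decide ((↑(a + k) : Int) ≤ ↑(L + k) - 1) = decide ((↑a : Int) ≤ (↑L : Int) - 1) := by
  rw [decide_eq_decide]
  push_cast
  omega

-- how the counter behaves across an append
theorem pvCountOnes_append (Y Z : List Int) :
    pvCountOnes (Y ++ Z) =
      if pvCountOnes Y = Y.length then Y.length + pvCountOnes Z else pvCountOnes Y := by
  induction Y with
  | nil => simp [pvCountOnes]
  | cons y ys ih =>
      by_cases hy : y = 1
      · simp only [List.cons_append, pvCountOnes, hy, ne_eq, not_true_eq_false, if_false, ih,
          List.length_cons]
        split_ifs with h1 h2 h3 <;> omega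
      · simp [pvCountOnes, hy]

-- appending a non-1 never changes the count
theorem pvCountOnes_append_non1 (Y : List Int) (b : Int) (hb : b ≠ 1) :
    pvCountOnes (Y ++ [b]) = pvCountOnes Y := by
  rw [pvCountOnes_append]
  split_ifs with h
  · simp [pvCountOnes, hb, h]
  · rfl

-- appending [c, 1] preserves the parity of the count
theorem pvCountOnes_append_pair_parity (Y : List Int) (c : Int) :
    pvCountOnes (Y ++ [c, 1]) % 2 = pvCountOnes Y % 2 := by
  rw [pvCountOnes_append]
  split_ifs with h
  · by_cases hc : c = 1 <;> simp [pvCountOnes, hc, h]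
  · rfl

theorem pv_main : ∀ (n : Nat) (l : List Int), l.length ≤ n →
    isOneBitCharacter_best_speed l = isOneBitCharacter_best_speed_alt l := by
  intro n
  induction n with
  | zero =>
      intro l hl
      have : l = [] := List.eq_nil_of_length_eq_zero (by omega)
      subst this
      simp [isOneBitCharacter_best_speed, isOneBitCharacter_best_speed_alt, pvALoop]
  | succ n ih =>
      intro l hl
      match l with
      | [] =>
          simp [isOneBitCharacter_best_speed, isOneBitCharacter_best_speed_alt, pvALoop]
      | [x] =>
          simp [isOneBitCharacter_best_speed, isOneBitCharacter_best_speed_alt,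
            pvALoop, pvCountOnes]
      | b :: c :: cs =>
          simp only [isOneBitCharacter_best_speed]
          rw [pvALoop]
          simp only [List.length_cons, List.getD_cons_zero]
          rw [dif_pos (by omega)]
          by_cases hb : b = 1
          · rw [if_pos hb]
            have h2 : pvALoop (b :: c :: cs) 2 = pvALoop cs 0 + 2 := by
              rw [show (2 : Nat) = 1 + 1 from rfl, pvALoop_shift, pvALoop_shift]
            rw [h2]
            match cs with
            | [] =>
                subst hb
                simp [isOneBitCharacter_best_speed_alt, pvALoop, pvCountOnes]
            | d :: ds =>
                rw [show (d :: ds).length + 1 + 1 = (d :: ds).length + 2 from rfl,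
                  pv_decide_shift (pvALoop (d :: ds) 0) (d :: ds).length 2]
                have hA : decide ((↑(pvALoop (d :: ds) 0) : Int) ≤ (↑(d :: ds).length : Int) - 1)
                    = isOneBitCharacter_best_speed (d :: ds) := rfl
                rw [hA, ih (d :: ds) (by simp at hl ⊢; omega)]
                -- B side: dropLast (b :: c :: d :: ds) = b :: c :: dropLast (d :: ds)
                subst hb
                simp only [isOneBitCharacter_best_speed_alt, reduceCtorEq, if_false]
                have hdl : (1 :: c :: d :: ds : List Int).dropLast
                    = 1 :: c :: (d :: ds).dropLast := by
                  simp [List.dropLast]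
                rw [hdl]
                simp only [List.reverse_cons]
                rw [List.append_assoc]
                have hpar := pvCountOnes_append_pair_parity ((d :: ds).dropLast.reverse) c
                simp only [List.cons_append, List.nil_append] at hpar ⊢
                rw [decide_eq_decide]
                omega
          · rw [if_neg hb]
            have h1 : pvALoop (b :: c :: cs) 1 = pvALoop (c :: cs) 0 + 1 := by
              rw [show (1 : Nat) = 0 + 1 from rfl, pvALoop_shift]
            rw [h1]
            rw [show cs.length + 1 + 1 = (c :: cs).length + 1 from rfl,
              pv_decide_shift (pvALoop (c :: cs) 0) (c :: cs).length 1]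
            have hA : decide ((↑(pvALoop (c :: cs) 0) : Int) ≤ (↑(c :: cs).length : Int) - 1)
                = isOneBitCharacter_best_speed (c :: cs) := rfl
            rw [hA, ih (c :: cs) (by simp at hl ⊢; omega)]
            simp only [isOneBitCharacter_best_speed_alt, reduceCtorEq, if_false]
            have hdl : (b :: c :: cs : List Int).dropLast = b :: (c :: cs).dropLast := by
              simp [List.dropLast]
            rw [hdl]
            simp only [List.reverse_cons]
            rw [pvCountOnes_append_non1 _ _ hb]

-- ===== VERDICT (by name: the statement is the Claim_ definition above) =====
theorem isOneBitCharacter_best_speed_spec : Claim_equal_isOneBitCharacter_best_speed := by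
  intro bits _
  unfold Spec_isOneBitCharacter_best_speed
  exact pv_main bits.length bits le_rfl
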